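-- pv_equiv track=rewrite | github.com/PiVASx/URBAN | module_2_hard.py | pairs_numbers
-- ===== SOURCE A (Python) =====
-- def pairs_numbers(num):
--     pairs = []
--     for i in range(1, num):
--         for j in range(1, 20):
--             if i < j and num % (i + j) == 0:
--                 pairs.append(i)
--                 pairs.append(j)
--     return ''.join(str(x) for x in pairs)
-- ===== SOURCE B (Python) =====
-- def pairs_numbers(num):
--     if num <= 0:
--         return ''
--     pairs = sorted((i, d - i)
--                    for d in range(3, 38) if num % d == 0
--                    for i in range(max(1, d - 19), (d - 1) // 2 + 1))
--     return ''.join('%d%d' % p for p in pairs)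
-- ===== Notes on version B (the rewrite author's own statement) =====
-- stated objective: faster
-- what changed: Instead of scanning every i in range(1, num) with an inner j-scan and a modulo test per pair, B enumerates the possible divisors d = i+j of num in the fixed interval [3,37], emits each divisor's pairs (i, d-i) directly, and sorts the collected pairs to reproduce A's lexicographic emission order.
import Mathlib
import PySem

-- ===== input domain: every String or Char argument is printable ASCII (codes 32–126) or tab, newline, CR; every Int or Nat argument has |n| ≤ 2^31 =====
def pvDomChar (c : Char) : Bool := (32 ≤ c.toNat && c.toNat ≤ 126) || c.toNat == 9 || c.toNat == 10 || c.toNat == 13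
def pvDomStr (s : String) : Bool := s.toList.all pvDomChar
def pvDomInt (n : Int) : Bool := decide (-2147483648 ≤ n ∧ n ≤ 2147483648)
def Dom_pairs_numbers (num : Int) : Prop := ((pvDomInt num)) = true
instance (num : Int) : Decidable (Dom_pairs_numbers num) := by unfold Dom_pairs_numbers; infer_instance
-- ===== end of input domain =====

-- B enumerates the divisors d = i+j of num in [3,37] and emits each divisor's pairs directly,
-- then sorts the pairs; A scans all i up to num. Objective: faster (loop count independent of num).

-- ===== PORT A =====
def pairs_numbers (num : Int) : String :=
  let pairs : List Int :=
    (PySem.List.pyRange 1 num 1).foldl (fun acc i =>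
      (PySem.List.pyRange 1 20 1).foldl (fun acc2 j =>
        if decide (i < j) && (PySem.Int.mod num (i + j) == 0) then acc2 ++ [i] ++ [j] else acc2)
        acc) []
  PySem.Str.join "" (pairs.map PySem.Int.toStr)

-- ===== PORT B =====
def pairs_numbers_alt (num : Int) : String :=
  if num ≤ 0 then "" else
  let pairs : List (Int × Int) :=
    PySem.List.sorted2
      ((PySem.List.pyRange 3 38 1).foldl (fun acc d =>
        if PySem.Int.mod num d == 0 then
          acc ++ (PySem.List.pyRange (max 1 (d - 19)) (PySem.Int.floordiv (d - 1) 2 + 1) 1).map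
            (fun i => (i, d - i))
        else acc) [])
      Prod.fst Prod.snd
  PySem.Str.join "" (pairs.map (fun p => PySem.Str.join "" [PySem.Int.toStr p.1, PySem.Int.toStr p.2]))

-- ===== PRECONDITION & SPEC =====
def Spec_pairs_numbers (num : Int) (out : String) : Prop := out = pairs_numbers_alt num
instance (num : Int) (out : String) : Decidable (Spec_pairs_numbers num out) := by unfold Spec_pairs_numbers; infer_instance

-- ===== CLAIM (what is proved, stated in full; the proofs are below) =====
def Claim_equal_pairs_numbers : Prop := ∀ (num : Int), Dom_pairs_numbers num → Spec_pairs_numbers num (pairs_numbers num)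

-- ===== LEMMAS AND PROOFS =====

-- the per-pair divisibility condition both programs test
def pvCond (num : Int) (p : Int × Int) : Bool := PySem.Int.mod num (p.1 + p.2) == 0

-- all candidate pairs in A's emission order (i-major, lexicographic)
def pvLA : List (Int × Int) :=
  (PySem.List.pyRange 1 19 1).flatMap (fun i =>
    (PySem.List.pyRange 1 20 1).flatMap (fun j => if i < j then [(i, j)] else []))

-- all candidate pairs in B's emission order (divisor-major)
def pvLB : List (Int × Int) :=
  (PySem.List.pyRange 3 38 1).flatMap (fun d =>
    (PySem.List.pyRange (max 1 (d - 19)) (PySem.Int.floordiv (d - 1) 2 + 1) 1).map (fun i => (i, d - i)))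

-- strict / non-strict lexicographic order on pairs (Python's tuple order)
def pvLexLt (a b : Int × Int) : Prop := a.1 < b.1 ∨ (a.1 = b.1 ∧ a.2 < b.2)
def pvLexLe (a b : Int × Int) : Prop := a.1 < b.1 ∨ (a.1 = b.1 ∧ a.2 ≤ b.2)

set_option maxRecDepth 100000 in
lemma pvLA_perm_pvLB : pvLA.Perm pvLB := by decide

set_option maxRecDepth 100000 in
lemma pvLA_pairwise : pvLA.Pairwise pvLexLt := by
  have h : pvLA.Pairwise (fun a b => a.1 < b.1 ∨ (a.1 = b.1 ∧ a.2 < b.2)) := by decide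
  exact h

-- an append-under-if loop is a flatMap of guarded segments
lemma pv_foldl_append_guard {α β : Type} (l : List α) (acc : List β) (p : α → Bool) (g : α → List β) :
    l.foldl (fun a x => if p x then a ++ g x else a) acc
      = acc ++ l.flatMap (fun x => if p x then g x else []) := by
  have h : (fun (a : List β) (x : α) => if p x then a ++ g x else a)
      = fun a x => a ++ (if p x then g x else []) := by
    funext a x; cases p x <;> simp
  rw [h, PySem.List.foldl_append_eq_flatMap]

-- PySem.Chars.join with the empty separator is flatten
lemma pv_join_nil_sep (l : List (List Char)) : PySem.Chars.join [] l = l.flatten := by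
  induction l with
  | nil => simp [PySem.Chars.join, List.intercalate]
  | cons x xs ih =>
    cases xs with
    | nil => simp [PySem.Chars.join, List.intercalate]
    | cons y ys =>
      simp only [PySem.Chars.join, List.intercalate] at ih ⊢
      simp [List.intersperse, List.flatten] at ih ⊢
      exact ih

-- joining str(i)+str(j) pairwise equals joining the flattened int list
lemma pv_join_pairs (l : List (Int × Int)) :
    PySem.Str.join "" ((l.flatMap (fun p => [p.1] ++ [p.2])).map PySem.Int.toStr)
      = PySem.Str.join "" (l.map (fun p => PySem.Str.join "" [PySem.Int.toStr p.1, PySem.Int.toStr p.2])) := by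
  simp only [PySem.Str.join]
  congr 1
  simp only [String.toList_empty, pv_join_nil_sep]
  induction l with
  | nil => rfl
  | cons x xs ih => simp_all

-- insertion into a lex-sorted list keeps it sorted
lemma pv_insertBy_pairwise (x : Int × Int) (ys : List (Int × Int))
    (h : ys.Pairwise pvLexLe) :
    (PySem.List.insertBy (fun a b => decide (a.1 < b.1) || (!decide (b.1 < a.1) && decide (a.2 < b.2))) x ys).Pairwise pvLexLe := by
  induction ys with
  | nil => simp [PySem.List.insertBy]
  | cons y ys ih =>
    rw [List.pairwise_cons] at h
    obtain ⟨hy, hys⟩ := h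
    by_cases hb : (decide (x.1 < y.1) || (!decide (y.1 < x.1) && decide (x.2 < y.2))) = true
    · rw [show PySem.List.insertBy (fun a b => decide (a.1 < b.1) || (!decide (b.1 < a.1) && decide (a.2 < b.2))) x (y :: ys)
          = x :: y :: ys by simp [PySem.List.insertBy, hb]]
      have hxy : pvLexLe x y := by
        simp only [Bool.or_eq_true, Bool.and_eq_true, decide_eq_true_eq, Bool.not_eq_true', decide_eq_false_iff_not] at hb
        unfold pvLexLe; omega
      refine List.pairwise_cons.mpr ⟨?_, List.pairwise_cons.mpr ⟨hy, hys⟩⟩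
      intro z hz
      rcases List.mem_cons.mp hz with rfl | hz
      · exact hxy
      · have := hy z hz
        unfold pvLexLe at *; omega
    · rw [show PySem.List.insertBy (fun a b => decide (a.1 < b.1) || (!decide (b.1 < a.1) && decide (a.2 < b.2))) x (y :: ys)
          = y :: PySem.List.insertBy (fun a b => decide (a.1 < b.1) || (!decide (b.1 < a.1) && decide (a.2 < b.2))) x ys
          by simp [PySem.List.insertBy, hb]]
      refine List.pairwise_cons.mpr ⟨?_, ih hys⟩
      intro z hz
      rw [PySem.List.mem_insertBy] at hz
      rcases hz with rfl | hz
      · simp only [Bool.or_eq_true, Bool.and_eq_true, decide_eq_true_eq, Bool.not_eq_true', decide_eq_false_iff_not] at hb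
        unfold pvLexLe; omega
      · exact hy z hz

-- Python's tuple sort returns the unique lex-sorted rearrangement
lemma pv_sorted2_eq (xs ys : List (Int × Int)) (hp : ys.Perm xs) (hs : ys.Pairwise pvLexLt) :
    PySem.List.sorted2 xs Prod.fst Prod.snd = ys := by
  have hdef : PySem.List.sorted2 xs Prod.fst Prod.snd
      = xs.foldl (fun acc x => PySem.List.insertBy (fun a b => decide (a.1 < b.1) || (!decide (b.1 < a.1) && decide (a.2 < b.2))) x acc) [] := rfl
  rw [hdef]
  have hperm : (xs.foldl (fun acc x => PySem.List.insertBy (fun a b => decide (a.1 < b.1) || (!decide (b.1 < a.1) && decide (a.2 < b.2))) x acc) []).Perm xs := by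
    simpa using PySem.List.foldl_insertBy_perm _ xs []
  have hpw : ∀ (l : List (Int × Int)) (acc : List (Int × Int)), acc.Pairwise pvLexLe →
      (l.foldl (fun acc x => PySem.List.insertBy (fun a b => decide (a.1 < b.1) || (!decide (b.1 < a.1) && decide (a.2 < b.2))) x acc) acc).Pairwise pvLexLe := by
    intro l
    induction l with
    | nil => intro acc h; simpa using h
    | cons x xs ih => intro acc h; exact ih _ (pv_insertBy_pairwise x acc h)
  refine List.Perm.eq_of_pairwise (le := pvLexLe) ?_ (hpw xs [] (by simp))
    (hs.imp (fun h => by unfold pvLexLt pvLexLe at *; omega)) (hperm.trans hp.symm)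
  intro a b _ _ hab hba; unfold pvLexLe at hab hba
  have : a.1 = b.1 ∧ a.2 = b.2 := by omega
  exact Prod.ext this.1 this.2

-- B's generated (pre-sort) list is the filtered divisor-order master list
lemma pv_B_gen (num : Int) :
    ((PySem.List.pyRange 3 38 1).foldl (fun acc d =>
        if PySem.Int.mod num d == 0 then
          acc ++ (PySem.List.pyRange (max 1 (d - 19)) (PySem.Int.floordiv (d - 1) 2 + 1) 1).map
            (fun i => (i, d - i))
        else acc) [])
      = pvLB.filter (pvCond num) := by
  rw [pv_foldl_append_guard]
  unfold pvLB
  rw [List.filter_flatMap]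
  simp only [List.nil_append]
  congr 1
  funext d
  rw [List.filter_map]
  have hc : (pvCond num ∘ fun i => (i, d - i)) = fun _ => PySem.Int.mod num d == 0 := by
    funext i; simp [pvCond, Function.comp]
  rw [hc]
  cases h : (PySem.Int.mod num d == 0) <;> simp

-- A's pair stream, for 2 ≤ num, is the filtered lex-order master list flattened
lemma pv_A_pairs (num : Int) (h : 2 ≤ num) :
    ((PySem.List.pyRange 1 num 1).foldl (fun acc i =>
      (PySem.List.pyRange 1 20 1).foldl (fun acc2 j =>
        if decide (i < j) && (PySem.Int.mod num (i + j) == 0) then acc2 ++ [i] ++ [j] else acc2)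
        acc) [])
      = (pvLA.filter (pvCond num)).flatMap (fun p => [p.1] ++ [p.2]) := by
  have hF : (fun (acc : List Int) (i : Int) =>
      (PySem.List.pyRange 1 20 1).foldl (fun acc2 j =>
        if decide (i < j) && (PySem.Int.mod num (i + j) == 0) then acc2 ++ [i] ++ [j] else acc2) acc)
      = fun acc i => acc ++ (PySem.List.pyRange 1 20 1).flatMap
          (fun j => if decide (i < j) && (PySem.Int.mod num (i + j) == 0) then [i] ++ [j] else []) := by
    funext acc i
    have := pv_foldl_append_guard (PySem.List.pyRange 1 20 1) acc
      (fun j => decide (i < j) && (PySem.Int.mod num (i + j) == 0)) (fun j => [i] ++ [j])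
    simpa using this
  rw [hF, PySem.List.foldl_append_eq_flatMap, List.nil_append]
  -- truncate the i-range to [1,19): larger i never pass the test
  have htrunc : (PySem.List.pyRange 1 num 1).flatMap
      (fun i => (PySem.List.pyRange 1 20 1).flatMap
        (fun j => if decide (i < j) && (PySem.Int.mod num (i + j) == 0) then [i] ++ [j] else []))
      = (PySem.List.pyRange 1 19 1).flatMap
      (fun i => (PySem.List.pyRange 1 20 1).flatMap
        (fun j => if decide (i < j) && (PySem.Int.mod num (i + j) == 0) then [i] ++ [j] else [])) := by
    rcases le_total 19 num with h19 | h19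
    · rw [PySem.List.pyRange_one_append 1 19 num (by omega) h19, List.flatMap_append]
      have : (PySem.List.pyRange 19 num 1).flatMap
          (fun i => (PySem.List.pyRange 1 20 1).flatMap
            (fun j => if decide (i < j) && (PySem.Int.mod num (i + j) == 0) then [i] ++ [j] else [])) = [] := by
        rw [List.flatMap_eq_nil_iff]
        intro i hi
        rw [PySem.List.mem_pyRange_one] at hi
        rw [List.flatMap_eq_nil_iff]
        intro j hj
        rw [PySem.List.mem_pyRange_one] at hj
        have : ¬ (i < j) := by omega
        simp [this]
      rw [this, List.append_nil]
    · rw [PySem.List.pyRange_one_append 1 num 19 (by omega) h19, List.flatMap_append]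
      have : (PySem.List.pyRange num 19 1).flatMap
          (fun i => (PySem.List.pyRange 1 20 1).flatMap
            (fun j => if decide (i < j) && (PySem.Int.mod num (i + j) == 0) then [i] ++ [j] else [])) = [] := by
        rw [List.flatMap_eq_nil_iff]
        intro i hi
        rw [PySem.List.mem_pyRange_one] at hi
        rw [List.flatMap_eq_nil_iff]
        intro j hj
        rw [PySem.List.mem_pyRange_one] at hj
        have hmod : PySem.Int.mod num (i + j) = num := by
          rw [PySem.Int.mod_eq_emod_of_pos (by omega)]
          exact Int.emod_eq_of_lt (by omega) (by omega)
        have : (PySem.Int.mod num (i + j) == 0) = false := by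
          simp [hmod]; omega
        simp [this]
      rw [this, List.append_nil]
  rw [htrunc]
  -- the RHS is the same double flatMap
  unfold pvLA
  rw [List.filter_flatMap, List.flatMap_assoc]
  congr 1
  funext i
  rw [List.filter_flatMap, List.flatMap_assoc]
  congr 1
  funext j
  by_cases hij : i < j
  · cases hc : pvCond num (i, j)
    · have : (PySem.Int.mod num (i + j) == 0) = false := by simpa [pvCond] using hc
      simp [hij, this, hc]
    · have : (PySem.Int.mod num (i + j) == 0) = true := by simpa [pvCond] using hc
      simp [hij, this, hc]
  · simp [hij]

lemma pv_A_eq (num : Int) (h : 2 ≤ num) :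
    pairs_numbers num
      = PySem.Str.join "" (((pvLA.filter (pvCond num)).flatMap (fun p => [p.1] ++ [p.2])).map PySem.Int.toStr) := by
  have h0 : pairs_numbers num
      = PySem.Str.join "" (((PySem.List.pyRange 1 num 1).foldl (fun acc i =>
          (PySem.List.pyRange 1 20 1).foldl (fun acc2 j =>
            if decide (i < j) && (PySem.Int.mod num (i + j) == 0) then acc2 ++ [i] ++ [j] else acc2)
            acc) []).map PySem.Int.toStr) := rfl
  rw [h0, pv_A_pairs num h]

lemma pv_B_eq (num : Int) (h : 2 ≤ num) :
    pairs_numbers_alt num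
      = PySem.Str.join "" ((pvLA.filter (pvCond num)).map
          (fun p => PySem.Str.join "" [PySem.Int.toStr p.1, PySem.Int.toStr p.2])) := by
  have h0 : pairs_numbers_alt num
      = PySem.Str.join "" ((PySem.List.sorted2
          ((PySem.List.pyRange 3 38 1).foldl (fun acc d =>
            if PySem.Int.mod num d == 0 then
              acc ++ (PySem.List.pyRange (max 1 (d - 19)) (PySem.Int.floordiv (d - 1) 2 + 1) 1).map
                (fun i => (i, d - i))
            else acc) [])
          Prod.fst Prod.snd).map (fun p => PySem.Str.join "" [PySem.Int.toStr p.1, PySem.Int.toStr p.2])) := by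
    simp only [pairs_numbers_alt, if_neg (show ¬ num ≤ 0 by omega)]
  rw [h0, pv_B_gen]
  congr 1
  exact congrArg _ (pv_sorted2_eq _ _ ((pvLA_perm_pvLB).filter (pvCond num)) (pvLA_pairwise.filter _))

-- ===== VERDICT (by name: the statement is the Claim_ definition above) =====
theorem pairs_numbers_spec : Claim_equal_pairs_numbers := by
  intro num _
  unfold Spec_pairs_numbers
  by_cases h : 1 ≤ num
  · rcases eq_or_lt_of_le h with h1 | h2
    · -- num = 1: both sides are concrete
      rw [← h1]
      decide
    · have h2' : 2 ≤ num := h2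
      rw [pv_A_eq num h2', pv_B_eq num h2', pv_join_pairs]
  · -- num ≤ 0: both empty
    have hA : pairs_numbers num = PySem.Str.join "" ([] : List String) := by
      have h0 : pairs_numbers num
          = PySem.Str.join "" (((PySem.List.pyRange 1 num 1).foldl (fun acc i =>
              (PySem.List.pyRange 1 20 1).foldl (fun acc2 j =>
                if decide (i < j) && (PySem.Int.mod num (i + j) == 0) then acc2 ++ [i] ++ [j] else acc2)
                acc) []).map PySem.Int.toStr) := rfl
      rw [h0, show PySem.List.pyRange 1 num 1 = [] from PySem.List.pyRange_one_eq_nil (by omega)]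
      rfl
    rw [hA]
    simp [pairs_numbers_alt, show num ≤ 0 by omega]
    rfl
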